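-- pv_equiv track=rewrite | github.com/dorinbadea/RedAudit | redaudit/core/playbook_generator.py | _select_device_type
-- ===== SOURCE A (Python) =====
-- from typing import Any, Dict, List, Optional
--
-- def _select_device_type(
--     device_type: Optional[str], device_type_hints: Optional[List[str]]
-- ) -> Optional[str]:
--     if isinstance(device_type, str):
--         value = device_type.strip().lower()
--         if value and value != "unknown":
--             return value
--
--     hints = []
--     if isinstance(device_type_hints, list):
--         hints = [str(h).strip().lower() for h in device_type_hints if h]
--
--     if not hints:
--         return None
--
--     for preferred in (
--         "router",
--         "firewall",
--         "gateway",
--         "vpn",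
--         "printer",
--         "smart_tv",
--         "iot",
--     ):
--         if preferred in hints:
--             return preferred
--
--     return hints[0] if hints else None
-- ===== SOURCE B (Python) =====
-- from typing import List, Optional
--
-- _RANK = {
--     "router": 0,
--     "firewall": 1,
--     "gateway": 2,
--     "vpn": 3,
--     "printer": 4,
--     "smart_tv": 5,
--     "iot": 6,
-- }
--
--
-- def _best(hints):
--     # right fold: walk hints back to front keeping the min-by-rank,
--     # ties resolved toward the earlier (later-visited) hint
--     best = hints[-1]
--     for h in reversed(hints[:-1]):
--         if _RANK.get(h, 7) <= _RANK.get(best, 7):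
--             best = h
--     return best
--
--
-- def _select_device_type(
--     device_type: Optional[str], device_type_hints: Optional[List[str]]
-- ) -> Optional[str]:
--     value = device_type.strip().lower() if isinstance(device_type, str) else ""
--     if value and value != "unknown":
--         return value
--     hints = (
--         [str(h).strip().lower() for h in device_type_hints if h]
--         if isinstance(device_type_hints, list)
--         else []
--     )
--     return _best(hints) if hints else None
-- ===== Notes on version B (the rewrite author's own statement) =====
-- stated objective: alternative
-- what changed: Replaces A's 7 sequential membership scans over hints (one per preferred type, then a hints[0] fallback) by a rank dictionary plus a single back-to-front min-by-rank fold over the hints, with the early device_type check folded into one normalized value expression.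
import Mathlib
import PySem

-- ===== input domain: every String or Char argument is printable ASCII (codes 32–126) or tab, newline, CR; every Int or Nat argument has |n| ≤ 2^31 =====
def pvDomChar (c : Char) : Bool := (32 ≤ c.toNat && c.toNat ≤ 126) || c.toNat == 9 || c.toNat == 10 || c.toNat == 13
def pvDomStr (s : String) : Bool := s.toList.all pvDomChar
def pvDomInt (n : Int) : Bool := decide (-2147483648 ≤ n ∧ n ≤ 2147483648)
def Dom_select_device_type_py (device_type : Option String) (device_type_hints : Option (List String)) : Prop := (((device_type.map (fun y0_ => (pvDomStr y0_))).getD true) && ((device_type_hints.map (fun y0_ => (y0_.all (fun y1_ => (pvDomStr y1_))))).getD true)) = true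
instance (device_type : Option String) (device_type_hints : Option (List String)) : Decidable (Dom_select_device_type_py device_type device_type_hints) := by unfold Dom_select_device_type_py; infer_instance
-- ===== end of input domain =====

-- B replaces A's 7 sequential membership scans over the preferred tuple by a rank dictionary
-- and one recursive earliest-min-by-rank selection over the hints; objective: alternative.

-- ===== PORT A =====
-- the for-loop over the 7-element preferred tuple; after the loop: `return hints[0] if hints else None`
def selA_scan : List String → List String → Option String
  | [], hints => hints.head?
  | p :: ps, hints => if hints.contains p then some p else selA_scan ps hints

def selA_preferred : List String :=
  ["router", "firewall", "gateway", "vpn", "printer", "smart_tv", "iot"]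

-- the part of A after the early `return value` (hints building, empty check, preferred scan)
def selA_rest (device_type_hints : Option (List String)) : Option String :=
  let hints : List String :=
    match device_type_hints with
    | some l => (l.filter (fun h => h ≠ "")).map (fun h => PySem.Str.lower (PySem.Str.strip h))
    | none => []
  if hints = [] then none
  else selA_scan selA_preferred hints

def select_device_type_py (device_type : Option String) (device_type_hints : Option (List String)) : Option String :=
  match device_type with
  | some s =>
    let value := PySem.Str.lower (PySem.Str.strip s)
    if value ≠ "" ∧ value ≠ "unknown" then some value
    else selA_rest device_type_hints
  | none => selA_rest device_type_hints

-- ===== PORT B =====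
-- Source B's module-level _RANK dict literal
def bRank : PySem.Dict String Int :=
  PySem.Dict.ofList
    [("router", 0), ("firewall", 1), ("gateway", 2), ("vpn", 3),
     ("printer", 4), ("smart_tv", 5), ("iot", 6)]

-- Source B's _best: a back-to-front min-by-rank fold (best = hints[-1], then walk the rest
-- reversed, keeping h when rank h <= rank best); written as the equivalent structural
-- right-recursion. Python raises IndexError on []; _best is only called on non-empty
-- hints, "" is a dummy.
def bBest : List String → String
  | [] => ""
  | [head] => head
  | head :: rest0 =>
    let rest := bBest rest0
    if bRank.getD head 7 ≤ bRank.getD rest 7 then head else rest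

def select_device_type_py_alt (device_type : Option String) (device_type_hints : Option (List String)) : Option String :=
  let value : String :=
    (device_type.map (fun s => PySem.Str.lower (PySem.Str.strip s))).getD ""
  if value ≠ "" ∧ value ≠ "unknown" then some value
  else
    let hints : List String :=
      (device_type_hints.map
        (fun l => (l.filter (fun h => h ≠ "")).map (fun h => PySem.Str.lower (PySem.Str.strip h)))).getD []
    if hints ≠ [] then some (bBest hints) else none

-- ===== PRECONDITION & SPEC =====
def Spec_select_device_type_py (device_type : Option String) (device_type_hints : Option (List String)) (out : Option String) : Prop := out = select_device_type_py_alt device_type device_type_hints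
instance (device_type : Option String) (device_type_hints : Option (List String)) (out : Option String) : Decidable (Spec_select_device_type_py device_type device_type_hints out) := by unfold Spec_select_device_type_py; infer_instance

-- ===== CLAIM (what is proved, stated in full; the proofs are below) =====
def Claim_equal_select_device_type_py : Prop := ∀ (device_type : Option String) (device_type_hints : Option (List String)), Dom_select_device_type_py device_type device_type_hints → Spec_select_device_type_py device_type device_type_hints (select_device_type_py device_type device_type_hints)

-- ===== LEMMAS AND PROOFS =====

-- closed-form rank function (both the dict lookup with default 7, and A's scan order)
def rankF (h : String) : Int :=
  if h = "router" then 0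
  else if h = "firewall" then 1
  else if h = "gateway" then 2
  else if h = "vpn" then 3
  else if h = "printer" then 4
  else if h = "smart_tv" then 5
  else if h = "iot" then 6
  else 7

-- minimum rank over a list (8 for the empty list)
def minRank (l : List String) : Int := l.foldr (fun h m => min (rankF h) m) 8

theorem rankF_le (h : String) : rankF h ≤ 7 := by
  unfold rankF; split_ifs <;> norm_num

theorem rankF_cases (h : String) :
    (h = "router" ∧ rankF h = 0) ∨ (h = "firewall" ∧ rankF h = 1) ∨
    (h = "gateway" ∧ rankF h = 2) ∨ (h = "vpn" ∧ rankF h = 3) ∨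
    (h = "printer" ∧ rankF h = 4) ∨ (h = "smart_tv" ∧ rankF h = 5) ∨
    (h = "iot" ∧ rankF h = 6) ∨ rankF h = 7 := by
  unfold rankF; split_ifs <;> simp_all

theorem bRank_getD (h : String) : bRank.getD h 7 = rankF h := by
  have hmk : bRank = PySem.Dict.mk
      [("router", 0), ("firewall", 1), ("gateway", 2), ("vpn", 3),
       ("printer", 4), ("smart_tv", 5), ("iot", 6)] := by decide
  rw [hmk, PySem.Dict.getD_eq_get?_getD]
  simp only [PySem.Dict.get?_mk_cons, rankF]
  split_ifs <;> simp_all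
  rfl

theorem minRank_le_of_mem {h : String} {l : List String} (hm : h ∈ l) :
    minRank l ≤ rankF h := by
  induction l with
  | nil => cases hm
  | cons a t ih =>
    rcases List.mem_cons.mp hm with rfl | hmem
    · exact min_le_left _ _
    · exact le_trans (min_le_right _ _) (ih hmem)

theorem le_minRank {r : Int} {l : List String} (hr : r ≤ 8)
    (hall : ∀ h ∈ l, r ≤ rankF h) : r ≤ minRank l := by
  induction l with
  | nil => exact hr
  | cons a t ih =>
    exact le_min (hall a (by simp)) (ih (fun h hm => hall h (List.mem_cons_of_mem a hm)))

theorem find?_of_iff (p : String → Bool) (a : String)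
    (hp : ∀ x, p x = true ↔ x = a) :
    ∀ l : List String, a ∈ l → l.find? p = some a := by
  intro l hm
  induction l with
  | nil => cases hm
  | cons x t ih =>
    by_cases hx : p x = true
    · have hthis : x = a := (hp x).mp hx
      subst hthis
      rw [List.find?_cons_of_pos (h := hx)]
    · have hxa : x ≠ a := fun e => hx ((hp x).mpr e)
      have hat : a ∈ t := by
        rcases List.mem_cons.mp hm with rfl | h
        · exact absurd rfl hxa
        · exact h
      rw [List.find?_cons_of_neg (h := by simpa using hx)]
      exact ih hat

-- B's recursion picks the earliest hint of minimal rank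
theorem bBest_spec : ∀ (h : String) (t : List String),
    rankF (bBest (h :: t)) = minRank (h :: t) ∧
    (h :: t).find? (fun x => decide (rankF x = minRank (h :: t))) = some (bBest (h :: t)) := by
  intro h t
  induction t generalizing h with
  | nil =>
    have hM : minRank [h] = rankF h := by
      simp only [minRank, List.foldr]
      exact min_eq_left (by have := rankF_le h; omega)
    constructor
    · simp [bBest, hM]
    · rw [hM, List.find?_cons_of_pos (h := by simp)]; rfl
  | cons a s ih =>
    obtain ⟨ih1, ih2⟩ := ih a
    have hB : bBest (h :: a :: s) =
        if rankF h ≤ rankF (bBest (a :: s)) then h else bBest (a :: s) := by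
      simp only [bBest, bRank_getD]
    have hM : minRank (h :: a :: s) = min (rankF h) (minRank (a :: s)) := rfl
    by_cases hc : rankF h ≤ rankF (bBest (a :: s))
    · have hBh : bBest (h :: a :: s) = h := by rw [hB, if_pos hc]
      have hmin : minRank (h :: a :: s) = rankF h := by
        rw [hM]; exact min_eq_left (by rw [← ih1] at *; omega)
      refine ⟨by rw [hBh, hmin], ?_⟩
      rw [hBh, hmin, List.find?_cons_of_pos (h := by simp)]
    · push_neg at hc
      rw [ih1] at hc
      have hBh : bBest (h :: a :: s) = bBest (a :: s) := by
        rw [hB, if_neg (by rw [ih1]; omega)]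
      have hmin : minRank (h :: a :: s) = minRank (a :: s) := by
        rw [hM]; exact min_eq_right (by omega)
      refine ⟨by rw [hBh, hmin, ih1], ?_⟩
      rw [hBh, hmin, List.find?_cons_of_neg (h := by simp; omega)]
      exact ih2

theorem keyCase (hints : List String) (a : String) (r : Int)
    (ha : rankF a = r) (hmem : a ∈ hints)
    (hinj : ∀ h, rankF h = r → h = a)
    (hlow : ∀ h ∈ hints, r ≤ rankF h) :
    hints.find? (fun h => decide (rankF h = minRank hints)) = some a := by
  have hM : minRank hints = r :=
    le_antisymm (ha ▸ minRank_le_of_mem hmem)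
      (le_minRank (by have := rankF_le a; omega) hlow)
  rw [hM]
  refine find?_of_iff _ a (fun x => ?_) hints hmem
  constructor
  · intro hx; exact hinj x (by simpa using hx)
  · intro hx; subst hx; simpa using ha

-- A's scan over the preferred tuple equals the earliest-minimal-rank hint
theorem bridge (hints : List String) (hne : hints ≠ []) :
    selA_scan selA_preferred hints =
      hints.find? (fun h => decide (rankF h = minRank hints)) := by
  obtain ⟨x, t, rfl⟩ := List.exists_cons_of_ne_nil hne
  simp only [selA_scan, selA_preferred]
  by_cases c0 : "router" ∈ x :: t
  · rw [if_pos (show ((x :: t).contains "router") = true by simpa using c0)]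
    refine (keyCase _ "router" 0 (by decide) c0 ?_ ?_).symm
    · intro h hr
      rcases rankF_cases h with ⟨e,v⟩|⟨e,v⟩|⟨e,v⟩|⟨e,v⟩|⟨e,v⟩|⟨e,v⟩|⟨e,v⟩|v <;> first | omega | exact e
    · intro h hm
      rcases rankF_cases h with ⟨e,v⟩|⟨e,v⟩|⟨e,v⟩|⟨e,v⟩|⟨e,v⟩|⟨e,v⟩|⟨e,v⟩|v <;>
        first | omega | (subst e; exact absurd hm (by assumption))
  · rw [if_neg (show ¬ ((x :: t).contains "router") = true by simpa using c0)]
    by_cases c1 : "firewall" ∈ x :: t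
    · rw [if_pos (show ((x :: t).contains "firewall") = true by simpa using c1)]
      refine (keyCase _ "firewall" 1 (by decide) c1 ?_ ?_).symm
      · intro h hr
        rcases rankF_cases h with ⟨e,v⟩|⟨e,v⟩|⟨e,v⟩|⟨e,v⟩|⟨e,v⟩|⟨e,v⟩|⟨e,v⟩|v <;> first | omega | exact e
      · intro h hm
        rcases rankF_cases h with ⟨e,v⟩|⟨e,v⟩|⟨e,v⟩|⟨e,v⟩|⟨e,v⟩|⟨e,v⟩|⟨e,v⟩|v <;>
          first | omega | (subst e; exact absurd hm (by assumption))
    · rw [if_neg (show ¬ ((x :: t).contains "firewall") = true by simpa using c1)]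
      by_cases c2 : "gateway" ∈ x :: t
      · rw [if_pos (show ((x :: t).contains "gateway") = true by simpa using c2)]
        refine (keyCase _ "gateway" 2 (by decide) c2 ?_ ?_).symm
        · intro h hr
          rcases rankF_cases h with ⟨e,v⟩|⟨e,v⟩|⟨e,v⟩|⟨e,v⟩|⟨e,v⟩|⟨e,v⟩|⟨e,v⟩|v <;> first | omega | exact e
        · intro h hm
          rcases rankF_cases h with ⟨e,v⟩|⟨e,v⟩|⟨e,v⟩|⟨e,v⟩|⟨e,v⟩|⟨e,v⟩|⟨e,v⟩|v <;>
            first | omega | (subst e; exact absurd hm (by assumption))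
      · rw [if_neg (show ¬ ((x :: t).contains "gateway") = true by simpa using c2)]
        by_cases c3 : "vpn" ∈ x :: t
        · rw [if_pos (show ((x :: t).contains "vpn") = true by simpa using c3)]
          refine (keyCase _ "vpn" 3 (by decide) c3 ?_ ?_).symm
          · intro h hr
            rcases rankF_cases h with ⟨e,v⟩|⟨e,v⟩|⟨e,v⟩|⟨e,v⟩|⟨e,v⟩|⟨e,v⟩|⟨e,v⟩|v <;> first | omega | exact e
          · intro h hm
            rcases rankF_cases h with ⟨e,v⟩|⟨e,v⟩|⟨e,v⟩|⟨e,v⟩|⟨e,v⟩|⟨e,v⟩|⟨e,v⟩|v <;>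
              first | omega | (subst e; exact absurd hm (by assumption))
        · rw [if_neg (show ¬ ((x :: t).contains "vpn") = true by simpa using c3)]
          by_cases c4 : "printer" ∈ x :: t
          · rw [if_pos (show ((x :: t).contains "printer") = true by simpa using c4)]
            refine (keyCase _ "printer" 4 (by decide) c4 ?_ ?_).symm
            · intro h hr
              rcases rankF_cases h with ⟨e,v⟩|⟨e,v⟩|⟨e,v⟩|⟨e,v⟩|⟨e,v⟩|⟨e,v⟩|⟨e,v⟩|v <;> first | omega | exact e
            · intro h hm
              rcases rankF_cases h with ⟨e,v⟩|⟨e,v⟩|⟨e,v⟩|⟨e,v⟩|⟨e,v⟩|⟨e,v⟩|⟨e,v⟩|v <;>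
                first | omega | (subst e; exact absurd hm (by assumption))
          · rw [if_neg (show ¬ ((x :: t).contains "printer") = true by simpa using c4)]
            by_cases c5 : "smart_tv" ∈ x :: t
            · rw [if_pos (show ((x :: t).contains "smart_tv") = true by simpa using c5)]
              refine (keyCase _ "smart_tv" 5 (by decide) c5 ?_ ?_).symm
              · intro h hr
                rcases rankF_cases h with ⟨e,v⟩|⟨e,v⟩|⟨e,v⟩|⟨e,v⟩|⟨e,v⟩|⟨e,v⟩|⟨e,v⟩|v <;> first | omega | exact e
              · intro h hm
                rcases rankF_cases h with ⟨e,v⟩|⟨e,v⟩|⟨e,v⟩|⟨e,v⟩|⟨e,v⟩|⟨e,v⟩|⟨e,v⟩|v <;>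
                  first | omega | (subst e; exact absurd hm (by assumption))
            · rw [if_neg (show ¬ ((x :: t).contains "smart_tv") = true by simpa using c5)]
              by_cases c6 : "iot" ∈ x :: t
              · rw [if_pos (show ((x :: t).contains "iot") = true by simpa using c6)]
                refine (keyCase _ "iot" 6 (by decide) c6 ?_ ?_).symm
                · intro h hr
                  rcases rankF_cases h with ⟨e,v⟩|⟨e,v⟩|⟨e,v⟩|⟨e,v⟩|⟨e,v⟩|⟨e,v⟩|⟨e,v⟩|v <;> first | omega | exact e
                · intro h hm
                  rcases rankF_cases h with ⟨e,v⟩|⟨e,v⟩|⟨e,v⟩|⟨e,v⟩|⟨e,v⟩|⟨e,v⟩|⟨e,v⟩|v <;>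
                    first | omega | (subst e; exact absurd hm (by assumption))
              · rw [if_neg (show ¬ ((x :: t).contains "iot") = true by simpa using c6)]
                have hall : ∀ h ∈ x :: t, rankF h = 7 := by
                  intro h hm
                  rcases rankF_cases h with ⟨e,v⟩|⟨e,v⟩|⟨e,v⟩|⟨e,v⟩|⟨e,v⟩|⟨e,v⟩|⟨e,v⟩|v <;>
                    first | (subst e; exact absurd hm (by assumption)) | omega
                have hx7 : rankF x = 7 := hall x (by simp)
                have hM : minRank (x :: t) = 7 :=
                  le_antisymm
                    (by have h1 := minRank_le_of_mem (show x ∈ x :: t by simp); have h2 := rankF_le x; omega)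
                    (le_minRank (by norm_num) (fun h hm => le_of_eq (hall h hm).symm))
                rw [hM, List.find?_cons_of_pos (h := by simp [hx7])]
                rfl

-- the second halves agree: A's scan-with-fallback = B's recursive selection
theorem rest_eq (dh : Option (List String)) :
    selA_rest dh =
      (let hints : List String :=
        (dh.map (fun l => (l.filter (fun h => h ≠ "")).map
          (fun h => PySem.Str.lower (PySem.Str.strip h)))).getD []
       if hints ≠ [] then some (bBest hints) else none) := by
  have key : ∀ hints : List String,
      (if hints = [] then none else selA_scan selA_preferred hints) =
      (if hints ≠ [] then some (bBest hints) else none) := by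
    intro hints
    cases hints with
    | nil => simp
    | cons x t =>
      rw [if_neg (by simp), if_pos (by simp)]
      rw [bridge (x :: t) (by simp)]
      exact (bBest_spec x t).2
  cases dh with
  | none => exact key []
  | some l => exact key _

-- ===== VERDICT (by name: the statement is the Claim_ definition above) =====
theorem select_device_type_py_spec : Claim_equal_select_device_type_py := by
  intro dt dh _
  unfold Spec_select_device_type_py select_device_type_py select_device_type_py_alt
  cases dt with
  | none =>
    simp only [Option.map_none, Option.getD_none]
    rw [if_neg (by simp)]
    exact rest_eq dh
  | some s =>
    simp only [Option.map_some, Option.getD_some]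
    by_cases hv : (PySem.Str.lower (PySem.Str.strip s) ≠ "" ∧ PySem.Str.lower (PySem.Str.strip s) ≠ "unknown")
    · rw [if_pos hv, if_pos hv]
    · rw [if_neg hv, if_neg hv]
      exact rest_eq dh
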